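-- pv_equiv track=rewrite | github.com/pabhd3/Coding-Challenges | adventofcode/2019/04 - Secure Container/password.py | noLargerSets
-- ===== SOURCE A (Python) =====
-- def noLargerSets(possibilities):
--     newPoss = []
--     for p in possibilities:
--         strP = str(p)
--         temp = {}
--         for i in strP:
--             try:
--                 temp[i] += 1
--             except:
--                 temp[i] = 1
--         if(2 not in [temp[i] for i in temp]):
--             continue
--         newPoss.append(p)
--     return newPoss
-- ===== SOURCE B (Python) =====
-- def _hasPair(s):
--     # s: sorted list of characters; True iff some run has length exactly 2
--     i = 0
--     n = len(s)
--     while i < n: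
--         j = i
--         while j < n and s[j] == s[i]:
--             j += 1
--         if j - i == 2:
--             return True
--         i = j
--     return False
--
--
-- def noLargerSets(possibilities):
--     return [p for p in possibilities if _hasPair(sorted(str(p)))]
-- ===== Notes on version B (the rewrite author's own statement) =====
-- stated objective: alternative
-- what changed: Per number, B sorts the digit characters and scans consecutive runs for one of length exactly 2 (filter comprehension), replacing A's try/except frequency-dict build and value-list membership test.
import Mathlib
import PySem

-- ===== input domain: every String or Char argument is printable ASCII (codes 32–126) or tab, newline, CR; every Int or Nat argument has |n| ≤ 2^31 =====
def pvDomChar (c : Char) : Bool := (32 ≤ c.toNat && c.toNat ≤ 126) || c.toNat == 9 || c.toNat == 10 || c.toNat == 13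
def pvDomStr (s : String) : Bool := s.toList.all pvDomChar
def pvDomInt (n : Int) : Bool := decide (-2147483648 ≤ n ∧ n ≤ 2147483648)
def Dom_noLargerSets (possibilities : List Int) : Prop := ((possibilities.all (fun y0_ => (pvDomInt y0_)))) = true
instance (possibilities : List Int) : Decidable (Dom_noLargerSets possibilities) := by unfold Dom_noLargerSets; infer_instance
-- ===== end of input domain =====

-- B replaces A's per-number frequency dict by sorting the digits and scanning runs of equal
-- characters, keeping the number iff some run has length exactly 2 (objective: alternative).

-- ===== PORT A =====
def noLargerSets (possibilities : List Int) : List Int :=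
  possibilities.foldl (fun newPoss p =>
    let strP := PySem.Int.toChars p
    let temp := strP.foldl (fun (temp : PySem.Dict Char Int) i =>
      match temp.get? i with
      | some v => temp.insert i (v + 1)      -- try: temp[i] += 1
      | none => temp.insert i 1) PySem.Dict.empty   -- except: temp[i] = 1
    if ¬ ((2 : Int) ∈ temp.keys.map (fun i => temp.getD i 0)) then newPoss
    else newPoss ++ [p]) []

-- ===== PORT B =====
-- _hasPair: outer loop over runs; the inner 'while s[j] == s[i]' is the run takeWhile/dropWhile
def hasPair : List Char → Bool
  | [] => false
  | c :: t =>
    if (t.takeWhile (· == c)).length + 1 == 2 then true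
    else hasPair (t.dropWhile (· == c))
termination_by l => l.length
decreasing_by
  exact Nat.lt_succ_of_le (List.length_dropWhile_le _ _)

def noLargerSets_alt (possibilities : List Int) : List Int :=
  possibilities.filter (fun p =>
    hasPair (PySem.List.sorted (PySem.Int.toChars p) (fun x => x) false))

-- ===== PRECONDITION & SPEC =====
def Spec_noLargerSets (possibilities : List Int) (out : List Int) : Prop := out = noLargerSets_alt possibilities
instance (possibilities : List Int) (out : List Int) : Decidable (Spec_noLargerSets possibilities out) := by unfold Spec_noLargerSets; infer_instance

-- ===== CLAIM (what is proved, stated in full; the proofs are below) =====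
def Claim_equal_noLargerSets : Prop := ∀ (possibilities : List Int), Dom_noLargerSets possibilities → Spec_noLargerSets possibilities (noLargerSets possibilities)

-- ===== LEMMAS AND PROOFS =====

-- A's try/except counting step is exactly 'd.insert i (d.getD i 0 + 1)'
lemma stepA_eq (temp : PySem.Dict Char Int) (i : Char) :
    (match temp.get? i with
      | some v => temp.insert i (v + 1)
      | none => temp.insert i 1) = temp.insert i (temp.getD i 0 + 1) := by
  unfold PySem.Dict.getD
  cases temp.get? i <;> simp

-- A's per-number condition characterised: 2 among the counter's values ↔ some char occurs exactly twice
lemma condA_iff (cs : List Char) :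
    ((2 : Int) ∈ (PySem.Dict.counter cs).keys.map (fun i => (PySem.Dict.counter cs).getD i 0))
      ↔ ∃ c ∈ cs, cs.count c = 2 := by
  rw [PySem.Dict.keys_counter]
  simp only [List.mem_map, PySem.Set.mem_ofList, PySem.Dict.getD_counter]
  constructor
  · rintro ⟨c, hc, h2⟩
    exact ⟨c, hc, by exact_mod_cast h2⟩
  · rintro ⟨c, hc, h2⟩
    exact ⟨c, hc, by exact_mod_cast h2⟩

-- in a ≤-sorted list whose elements are all ≥ c, the occurrences of c form the leading run
lemma count_eq_takeWhile (c : Char) (t : List Char) (h : t.Pairwise (· ≤ ·))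
    (hge : ∀ x ∈ t, c ≤ x) : t.count c = (t.takeWhile (· == c)).length := by
  induction t with
  | nil => simp
  | cons a t' ih =>
    by_cases ha : (a == c) = true
    · have hac : a = c := by simpa using ha
      subst hac
      simp only [List.takeWhile_cons, ha, if_true, List.count_cons_self, List.length_cons]
      rw [ih (List.pairwise_cons.mp h).2 (fun x hx => hge x (List.mem_cons_of_mem _ hx))]
    · have hca : c < a := lt_of_le_of_ne (hge a List.mem_cons_self)
        (fun he => ha (by simp [he.symm]))
      have hnot : c ∉ a :: t' := by
        intro hm
        rcases List.mem_cons.mp hm with he | hm'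
        · exact absurd hca (by simp [he])
        · exact absurd ((List.pairwise_cons.mp h).1 c hm') (not_le.mpr hca)
      simp [ha, List.count_eq_zero.mpr hnot]

-- after dropping the leading run of c from a ≤-sorted list with all elements ≥ c, everything is > c
lemma dropWhile_gt (c : Char) (t : List Char) (h : t.Pairwise (· ≤ ·))
    (hge : ∀ x ∈ t, c ≤ x) : ∀ x ∈ t.dropWhile (· == c), c < x := by
  induction t with
  | nil => simp
  | cons a t' ih =>
    by_cases ha : (a == c) = true
    · simp only [List.dropWhile_cons, ha, if_true]
      exact ih (List.pairwise_cons.mp h).2 (fun x hx => hge x (List.mem_cons_of_mem _ hx))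
    · simp only [List.dropWhile_cons, ha, Bool.false_eq_true, if_false]
      intro x hx
      have hca : c < a := lt_of_le_of_ne (hge a List.mem_cons_self)
        (fun he => ha (by simp [he.symm]))
      rcases List.mem_cons.mp hx with he | hm'
      · exact he ▸ hca
      · exact lt_of_lt_of_le hca ((List.pairwise_cons.mp h).1 x hm')

-- B's run scan on a ≤-sorted list finds a char of multiplicity exactly 2
lemma hasPair_iff (l : List Char) (h : l.Pairwise (· ≤ ·)) :
    hasPair l = true ↔ ∃ c ∈ l, l.count c = 2 := by
  induction l using hasPair.induct with
  | case1 => simp [hasPair]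
  | case2 c t hif =>
    have ht := List.pairwise_cons.mp h
    have hc2 : (c :: t).count c = (t.takeWhile (· == c)).length + 1 := by
      rw [List.count_cons_self, count_eq_takeWhile c t ht.2 ht.1]
    rw [hasPair, if_pos hif]
    have : (t.takeWhile (· == c)).length + 1 = 2 := by simpa using hif
    exact iff_of_true rfl ⟨c, List.mem_cons_self, by omega⟩
  | case3 c t hif ih =>
    have ht := List.pairwise_cons.mp h
    have hrun : (t.takeWhile (· == c)).length + 1 ≠ 2 := by simpa using hif
    have hc2 : (c :: t).count c = (t.takeWhile (· == c)).length + 1 := by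
      rw [List.count_cons_self, count_eq_takeWhile c t ht.2 ht.1]
    rw [hasPair, if_neg hif]
    have hsplit : t = t.takeWhile (· == c) ++ t.dropWhile (· == c) :=
      (List.takeWhile_append_dropWhile).symm
    have hrc : ∀ x ∈ t.takeWhile (· == c), x = c := by
      intro x hx
      simpa using List.mem_takeWhile_imp hx
    have hrestlt := dropWhile_gt c t ht.2 ht.1
    have hrestp : (t.dropWhile (· == c)).Pairwise (· ≤ ·) :=
      ht.2.sublist (List.dropWhile_sublist _)
    have hcnt_eq : ∀ x ∈ t.dropWhile (· == c),
        (c :: t).count x = (t.dropWhile (· == c)).count x := by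
      intro x hx
      have hxc : c ≠ x := ne_of_lt (hrestlt x hx)
      rw [List.count_cons, hsplit, List.count_append]
      have h1 : (t.takeWhile (· == c)).count x = 0 :=
        List.count_eq_zero.mpr (fun hm => hxc (hrc x hm).symm)
      have h2 : (x == c) = false := by simp [Ne.symm hxc]
      simp [h1, hxc]
    rw [ih hrestp]
    constructor
    · rintro ⟨x, hx, hcnt⟩
      refine ⟨x, ?_, ?_⟩
      · rw [hsplit]
        exact List.mem_cons_of_mem _ (List.mem_append_right _ hx)
      · rw [hcnt_eq x hx]; exact hcnt
    · rintro ⟨x, hx, hcnt⟩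
      by_cases hxc : x = c
      · exact absurd (hxc ▸ hcnt) (by omega)
      · have hxrest : x ∈ t.dropWhile (· == c) := by
          rw [hsplit] at hx
          rcases List.mem_cons.mp hx with he | hm
          · exact absurd he hxc
          · rcases List.mem_append.mp hm with hm1 | hm2
            · exact absurd (hrc x hm1) hxc
            · exact hm2
        exact ⟨x, hxrest, by rw [← hcnt_eq x hxrest]; exact hcnt⟩

-- per-number agreement of the two keep-conditions
lemma cond_agree (p : Int) :
    ((2 : Int) ∈
      ((PySem.Int.toChars p).foldl (fun (temp : PySem.Dict Char Int) i =>
        match temp.get? i with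
        | some v => temp.insert i (v + 1)
        | none => temp.insert i 1) PySem.Dict.empty).keys.map
          (fun i => ((PySem.Int.toChars p).foldl (fun (temp : PySem.Dict Char Int) i =>
            match temp.get? i with
            | some v => temp.insert i (v + 1)
            | none => temp.insert i 1) PySem.Dict.empty).getD i 0)
      ↔ hasPair (PySem.List.sorted (PySem.Int.toChars p) (fun x => x) false) = true) := by
  set cs := PySem.Int.toChars p with hcs
  have hfold : cs.foldl (fun (temp : PySem.Dict Char Int) i =>
      match temp.get? i with
      | some v => temp.insert i (v + 1)
      | none => temp.insert i 1) PySem.Dict.empty = PySem.Dict.counter cs := by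
    rw [← PySem.Dict.foldl_insert_getD_add_one_eq_counter]
    congr 1
    funext temp i
    exact stepA_eq temp i
  rw [hfold, condA_iff]
  have hperm := PySem.List.sorted_perm cs (fun x => x) false
  rw [hasPair_iff _ (PySem.List.sorted_pairwise cs (fun x => x))]
  constructor
  · rintro ⟨c, hc, hcnt⟩
    exact ⟨c, hperm.mem_iff.mpr hc, by rw [hperm.count_eq]; exact hcnt⟩
  · rintro ⟨c, hc, hcnt⟩
    exact ⟨c, hperm.mem_iff.mp hc, by rw [← hperm.count_eq]; exact hcnt⟩

-- ===== VERDICT (by name: the statement is the Claim_ definition above) =====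
theorem noLargerSets_spec : Claim_equal_noLargerSets := by
  intro possibilities _
  unfold Spec_noLargerSets noLargerSets noLargerSets_alt
  have hfilt := PySem.List.foldl_append_if
    (fun p : Int => hasPair (PySem.List.sorted (PySem.Int.toChars p) (fun x => x) false))
    (fun p : Int => p) possibilities []
  simp only [List.nil_append, List.map_id'] at hfilt
  rw [show (possibilities.filter (fun p =>
      hasPair (PySem.List.sorted (PySem.Int.toChars p) (fun x => x) false))) =
    possibilities.foldl (fun acc p =>
      if hasPair (PySem.List.sorted (PySem.Int.toChars p) (fun x => x) false) = true
      then acc ++ [p] else acc) [] from hfilt.symm]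
  apply PySem.List.foldl_congr_mem
  intro acc p _
  simp only
  by_cases hb : hasPair (PySem.List.sorted (PySem.Int.toChars p) (fun x => x) false) = true
  · rw [if_neg, if_pos hb]
    simp only [not_not]
    exact (cond_agree p).mpr hb
  · rw [if_pos, if_neg hb]
    intro hmem
    exact hb ((cond_agree p).mp hmem)
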